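-- pv_equiv track=rewrite | github.com/Multu/vps | level0/lesson17/main.py | LineAnalysis
-- ===== SOURCE A (Python) =====
-- def LineAnalysis(line):
--     separator_char = '*'
--
--     if len(line) == 0:
--         return False
--
--     if line[0] == line[len(line) - 1] == separator_char:
--         pass
--     else:
--         return False
--
--     # Collect all templates between separator char.
--     templates_list = []
--     template_item_chars = []
--     for i in range(1, len(line) - 1):
--         if line[i] == separator_char:
--             templates_list.append(''.join(template_item_chars))
--             template_item_chars = []
--         else:
--             template_item_chars.append(line[i])
--     templates_list.append(''.join(template_item_chars))
--
--     # Check if all templates are equals.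
--     for i in range(len(templates_list) - 1):
--         if templates_list[i] != templates_list[i + 1]:
--             return False
--
--     return True
-- ===== SOURCE B (Python) =====
-- def LineAnalysis(line):
--     if not line or line[0] != '*' or line[len(line) - 1] != '*':
--         return False
--     body = line[1:]
--     if not body:          # nothing between the bounding stars of a length-1 line
--         return True
--     unit = body[:body.index('*') + 1]   # first segment plus its closing '*'
--     while body:
--         if body[:len(unit)] != unit:
--             return False
--         body = body[len(unit):]
--     return True
-- ===== Notes on version B (the rewrite author's own statement) =====
-- stated objective: alternative
-- what changed: Instead of building the list of between-star segments and comparing adjacent pairs, B takes the first '*'-terminated block as a unit and strips copies of it off the body, i.e. an in-place periodicity check that never materialises a segment list.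
import Mathlib
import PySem

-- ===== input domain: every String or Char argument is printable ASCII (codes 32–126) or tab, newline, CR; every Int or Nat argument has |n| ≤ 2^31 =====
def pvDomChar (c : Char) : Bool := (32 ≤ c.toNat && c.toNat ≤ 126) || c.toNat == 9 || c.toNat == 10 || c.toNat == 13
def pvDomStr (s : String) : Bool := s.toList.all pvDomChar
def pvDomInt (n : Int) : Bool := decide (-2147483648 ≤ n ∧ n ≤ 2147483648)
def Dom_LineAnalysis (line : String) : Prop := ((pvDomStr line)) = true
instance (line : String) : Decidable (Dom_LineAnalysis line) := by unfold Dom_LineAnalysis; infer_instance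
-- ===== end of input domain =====

-- B re-implements A without building the segment list: it takes the first '*'-terminated block and
-- strips copies of it off the body (periodicity check); objective: alternative algorithm, same cost.

-- ===== PORT A =====
-- A reads the string only by integer index; the port works on the character list.
def LineAnalysisL (l : List Char) : Bool :=
  let sep := '*'
  if l.length = 0 then false
  else if PySem.List.pyGet? l 0 = PySem.List.pyGet? l ((l.length : Int) - 1) ∧
          PySem.List.pyGet? l ((l.length : Int) - 1) = some sep then
    -- for i in range(1, len(line)-1): split into templates  (indices are always in range here)
    let st := (PySem.List.pyRange 1 ((l.length : Int) - 1) 1).foldl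
      (fun (acc : List (List Char) × List Char) i =>
        if PySem.List.pyGetD l i sep = sep then (acc.1 ++ [acc.2], ([] : List Char))
        else (acc.1, acc.2 ++ [PySem.List.pyGetD l i sep]))
      ([], [])
    let ts := st.1 ++ [st.2]
    -- for i in range(len(templates_list)-1): early-return False on a mismatch
    (PySem.List.pyRange 0 ((ts.length : Int) - 1) 1).all
      (fun i => PySem.List.pyGetD ts i [] == PySem.List.pyGetD ts (i + 1) [])
  else false

def LineAnalysis (line : String) : Bool := LineAnalysisL line.toList

-- ===== PORT B =====
-- while body: strip one copy of `unit` (first segment + '*') or fail.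
-- The `unit.length = 0` guard only makes the recursion total; B never calls altRep with an empty unit.
def altRep (unit bdy : List Char) : Bool :=
  if bdy = [] then true
  else if unit.length = 0 then false
  else if bdy.take unit.length ≠ unit then false
  else altRep unit (bdy.drop unit.length)
termination_by bdy.length
decreasing_by
  rename_i h hu _
  have := List.length_pos_iff.mpr h
  simp [List.length_drop]
  omega

def LineAnalysisAltL (l : List Char) : Bool :=
  if l = [] ∨ PySem.List.pyGet? l 0 ≠ some '*' ∨
     PySem.List.pyGet? l ((l.length : Int) - 1) ≠ some '*' then false
  else
    let bdy := PySem.List.slice l (some 1) none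
    if bdy = [] then true
    else
      match PySem.List.index? bdy '*' with
      | none => false   -- unreachable: bdy ends in '*', so .index cannot raise
      | some idx => altRep (PySem.List.slice bdy none (some ((idx : Int) + 1))) bdy

def LineAnalysis_alt (line : String) : Bool := LineAnalysisAltL line.toList

-- ===== PRECONDITION & SPEC =====
def Spec_LineAnalysis (line : String) (out : Bool) : Prop := out = LineAnalysis_alt line
instance (line : String) (out : Bool) : Decidable (Spec_LineAnalysis line out) := by unfold Spec_LineAnalysis; infer_instance

-- ===== CLAIM (what is proved, stated in full; the proofs are below) =====
def Claim_equal_LineAnalysis : Prop := ∀ (line : String), Dom_LineAnalysis line → Spec_LineAnalysis line (LineAnalysis line)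

-- ===== LEMMAS AND PROOFS =====

-- The spec-side view of A's splitting loop.
def segsFrom (cur : List Char) : List Char → List (List Char)
  | [] => [cur]
  | c :: r => if c = '*' then cur :: segsFrom [] r else segsFrom (cur ++ [c]) r

theorem segsFrom_ne_nil (cur : List Char) (m : List Char) : segsFrom cur m ≠ [] := by
  induction m generalizing cur with
  | nil => simp [segsFrom]
  | cons c r ih => by_cases h : c = '*' <;> simp [segsFrom, h, ih]

theorem segsFrom_headI (cur : List Char) (m : List Char) :
    (segsFrom cur m).headI = cur ++ m.takeWhile (· ≠ '*') := by
  induction m generalizing cur with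
  | nil => simp [segsFrom]
  | cons c r ih =>
    by_cases h : c = '*'
    · simp [segsFrom, h, List.takeWhile_cons]
    · simp [segsFrom, h, ih, List.takeWhile_cons]

theorem segsFrom_flatMap (cur : List Char) (m : List Char) :
    (segsFrom cur m).flatMap (· ++ ['*']) = cur ++ m ++ ['*'] := by
  induction m generalizing cur with
  | nil => simp [segsFrom]
  | cons c r ih =>
    by_cases h : c = '*'
    · simp [segsFrom, h, ih]
    · simp [segsFrom, h, ih]

theorem segsFrom_starFree (cur : List Char) (m : List Char) (hc : '*' ∉ cur) :
    ∀ s ∈ segsFrom cur m, '*' ∉ s := by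
  induction m generalizing cur with
  | nil => simpa [segsFrom] using hc
  | cons c r ih =>
    by_cases h : c = '*'
    · intro s hs
      rcases (by simpa [segsFrom, h] using hs) with rfl | hs'
      · exact hc
      · exact ih [] (by simp) s hs'
    · intro s hs
      exact ih (cur ++ [c]) (by simp [hc, h, Ne.symm h]) s (by simpa [segsFrom, h] using hs)

-- foldA: A's accumulator loop computes segsFrom.
theorem foldA (m : List Char) (ts : List (List Char)) (cur : List Char) :
    (m.foldl (fun (acc : List (List Char) × List Char) c =>
        if c = '*' then (acc.1 ++ [acc.2], ([] : List Char)) else (acc.1, acc.2 ++ [c]))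
      (ts, cur)).1 ++
    [(m.foldl (fun (acc : List (List Char) × List Char) c =>
        if c = '*' then (acc.1 ++ [acc.2], ([] : List Char)) else (acc.1, acc.2 ++ [c]))
      (ts, cur)).2] = ts ++ segsFrom cur m := by
  induction m generalizing ts cur with
  | nil => simp [segsFrom]
  | cons c r ih =>
    by_cases h : c = '*'
    · simp [h, segsFrom, ih]
    · simp [h, segsFrom, ih]

-- take of a block equals the unit iff the block is the first segment.
theorem take_unit_iff (s0 : List Char) : ∀ (s t : List Char), '*' ∉ s → '*' ∉ s0 →
    ((s ++ '*' :: t).take (s0.length + 1) = s0 ++ ['*'] ↔ s = s0) := by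
  induction s0 with
  | nil =>
    intro s t hs _
    cases s with
    | nil => simp
    | cons c s' =>
      have : c ≠ '*' := fun h => hs (by simp [h])
      simp [this]
  | cons a s0' ih =>
    intro s t hs h0
    cases s with
    | nil =>
      have : a ≠ '*' := fun h => h0 (by simp [h])
      simp [List.take_succ_cons, this, Ne.symm this]
    | cons c s' =>
      have hs' : '*' ∉ s' := fun h => hs (by simp [h])
      have h0' : '*' ∉ s0' := fun h => h0 (by simp [h])
      simp only [List.cons_append, List.take_succ_cons, List.cons.injEq]
      constructor
      · rintro ⟨rfl, h2⟩
        exact ⟨rfl, (ih s' t hs' h0').mp h2⟩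
      · rintro ⟨rfl, rfl⟩
        exact ⟨rfl, (ih s' t hs' h0').mpr rfl⟩

theorem rep_eq (L : List (List Char)) (s0 : List Char) (h0 : '*' ∉ s0)
    (hL : ∀ s ∈ L, '*' ∉ s) :
    altRep (s0 ++ ['*']) (L.flatMap (· ++ ['*'])) = decide (∀ s ∈ L, s = s0) := by
  induction L with
  | nil => simp [altRep]
  | cons s L' ih =>
    have hs : '*' ∉ s := hL s (by simp)
    have hL' : ∀ x ∈ L', '*' ∉ x := fun x hx => hL x (by simp [hx])
    have hbody : (s :: L').flatMap (· ++ ['*']) = s ++ '*' :: L'.flatMap (· ++ ['*']) := by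
      simp
    rw [hbody, altRep]
    have hne : (s ++ '*' :: L'.flatMap (· ++ ['*'])) ≠ [] := by simp
    have hulen : (s0 ++ ['*']).length = s0.length + 1 := by simp
    by_cases heq : s = s0
    · subst heq
      have htake : (s ++ '*' :: L'.flatMap (· ++ ['*'])).take (s.length + 1) = s ++ ['*'] :=
        (take_unit_iff s s _ hs hs).mpr rfl
      have hdrop : (s ++ '*' :: L'.flatMap (· ++ ['*'])).drop (s.length + 1) =
          L'.flatMap (· ++ ['*']) := by
        rw [show s ++ '*' :: L'.flatMap (· ++ ['*']) = (s ++ ['*']) ++ L'.flatMap (· ++ ['*']) by simp,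
            show s.length + 1 = (s ++ ['*']).length by simp, List.drop_left]
      simp only [hne, if_neg, hulen, htake, hdrop]
      rw [if_neg (by simp), if_neg (by simp), if_neg (by simp)]
      rw [ih hL']
      simp
    · have htake : (s ++ '*' :: L'.flatMap (· ++ ['*'])).take (s0.length + 1) ≠ s0 ++ ['*'] := by
        intro h; exact heq ((take_unit_iff s0 s _ hs h0).mp h)
      rw [if_neg (by simp), if_neg (by simp [hulen]), if_pos (by simpa [hulen] using htake)]
      simp [heq]

-- first '*' in m ++ ['*'] sits right after takeWhile (· ≠ '*') m.
theorem index_star (m : List Char) :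
    PySem.List.index? (m ++ ['*']) '*' = some (m.takeWhile (· ≠ '*')).length := by
  induction m with
  | nil => simpa using PySem.List.index?_cons_self '*' ([] : List Char)
  | cons c r ih =>
    by_cases h : c = '*'
    · subst h
      simpa [List.takeWhile_cons] using PySem.List.index?_cons_self '*' (r ++ ['*'])
    · rw [List.cons_append, PySem.List.index?_cons_of_ne (r ++ ['*']) h, ih]
      simp [List.takeWhile_cons, h]

theorem take_unit (m : List Char) :
    (m ++ ['*']).take ((m.takeWhile (· ≠ '*')).length + 1) =
      m.takeWhile (· ≠ '*') ++ ['*'] := by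
  induction m with
  | nil => simp
  | cons c r ih =>
    by_cases h : c = '*'
    · simp [List.takeWhile_cons, h]
    · simpa [List.takeWhile_cons, h, List.take_succ_cons] using ih

-- A's adjacent-equality scan over indices says: every element equals the head.
theorem adjAll_eq (ts : List (List Char)) (hne : ts ≠ []) :
    ((PySem.List.pyRange 0 ((ts.length : Int) - 1) 1).all
      (fun i => PySem.List.pyGetD ts i [] == PySem.List.pyGetD ts (i + 1) [])) =
    decide (∀ s ∈ ts, s = ts.headI) := by
  have hlen : 0 < ts.length := List.length_pos_iff.mpr hne
  rw [Bool.eq_iff_iff]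
  simp only [List.all_eq_true, decide_eq_true_eq, beq_iff_eq]
  constructor
  · intro h s hs
    obtain ⟨k, hk, rfl⟩ := List.getElem_of_mem hs
    have hhead : ts.headI = ts[0] := by
      cases ts with
      | nil => simp at hlen
      | cons a l => simp
    rw [hhead]
    clear hs
    induction k with
    | zero => rfl
    | succ j ihj =>
      have hj : j < ts.length := by omega
      have hstep := h (j : Int) (by
        rw [PySem.List.mem_pyRange_one]
        constructor
        · exact_mod_cast Nat.zero_le j
        · omega)
      rw [PySem.List.pyGetD_eq_getElem ts [] (by exact_mod_cast Nat.zero_le j) (by push_cast; omega),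
          PySem.List.pyGetD_eq_getElem ts [] (by omega) (by push_cast; omega)] at hstep
      have hj1 : ((j : Int) + 1).toNat = j + 1 := by omega
      have hj0 : ((j : Int)).toNat = j := by omega
      simp only [hj0, hj1] at hstep
      rw [← hstep]
      exact ihj hj
  · intro h i hi
    rw [PySem.List.mem_pyRange_one] at hi
    obtain ⟨hi0, hi1⟩ := hi
    rw [PySem.List.pyGetD_eq_getElem ts [] hi0 (by omega),
        PySem.List.pyGetD_eq_getElem ts [] (by omega) (by push_cast; omega)]
    rw [h _ (List.getElem_mem _), h _ (List.getElem_mem _)]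

theorem starFree_takeWhile (m : List Char) : '*' ∉ m.takeWhile (· ≠ '*') := by
  intro h
  have := List.mem_takeWhile_imp h
  simp at this

-- The main list-level equivalence.
theorem mainL (l : List Char) : LineAnalysisL l = LineAnalysisAltL l := by
  by_cases hnil : l = []
  · subst hnil; decide
  · have hlen : 0 < l.length := List.length_pos_iff.mpr hnil
    have e0 : PySem.List.pyGet? l 0 = some (l[0]'hlen) := by
      simpa using PySem.List.pyGet?_eq_some_getElem l (i := 0) (by omega) (by exact_mod_cast hlen)
    have hNt : ((l.length : Int) - 1).toNat = l.length - 1 := by omega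
    have e1 : PySem.List.pyGet? l ((l.length : Int) - 1) = some (l[l.length - 1]'(by omega)) := by
      rw [PySem.List.pyGet?_eq_some_getElem l (by omega) (by omega)]
      simp [hNt]
    by_cases hg : l[0]'hlen = '*' ∧ l[l.length - 1]'(by omega) = '*'
    · rcases Nat.lt_or_ge l.length 2 with hsmall | hbig
      · have h1 : l.length = 1 := by omega
        obtain ⟨x, rfl⟩ := List.length_eq_one_iff.mp h1
        have hx : x = '*' := by simpa using hg.1
        subst hx; decide
      · obtain ⟨c, rest, rfl⟩ : ∃ c rest, l = c :: rest := by
          cases l with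
          | nil => exact absurd rfl hnil
          | cons c rest => exact ⟨c, rest, rfl⟩
        have hr : rest ≠ [] := by
          intro h; subst h; simp at hbig
        have hc : c = '*' := by simpa using hg.1
        subst hc
        obtain ⟨mid, rfl⟩ : ∃ mid, rest = mid ++ ['*'] := by
          refine ⟨rest.dropLast, ?_⟩
          have hlast : rest.getLast hr = '*' := by
            rw [← List.getLast_cons (a := '*') hr, List.getLast_eq_getElem]
            simpa using hg.2
          conv_lhs => rw [← List.dropLast_append_getLast hr, hlast]
        clear hg e0 e1 hNt hlen hnil hr hbig
        -- the split string: l = '*' :: mid ++ ['*']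
        show LineAnalysisL ('*' :: mid ++ ['*']) = LineAnalysisAltL ('*' :: mid ++ ['*'])
        have g0 : PySem.List.pyGet? ('*' :: mid ++ ['*']) 0 = some '*' :=
          PySem.List.pyGet?_zero_cons _ _
        have g1 : PySem.List.pyGet? ('*' :: mid ++ ['*'])
            ((('*' :: mid ++ ['*']).length : Int) - 1) = some '*' := by
          have h1 : ((('*' :: mid ++ ['*']).length : Int) - 1) = ((mid.length + 1 : Nat) : Int) := by
            simp
          rw [h1, PySem.List.pyGet?_natCast]
          rw [show ('*' :: mid ++ ['*']) = ('*' :: mid) ++ ['*'] by simp]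
          rw [show mid.length + 1 = ('*' :: mid).length by simp]
          exact List.getElem?_concat_length
        -- ===== A side =====
        have hA : LineAnalysisL ('*' :: mid ++ ['*']) =
            decide (∀ s ∈ segsFrom [] mid, s = mid.takeWhile (· ≠ '*')) := by
          simp only [LineAnalysisL]
          rw [if_neg (by simp), if_pos ⟨by rw [g0, g1], g1⟩]
          have hcongr := PySem.List.foldl_congr_mem
            (PySem.List.pyRange 1 ((('*' :: mid ++ ['*']).length : Int) - 1))
            (fun (acc : List (List Char) × List Char) i =>
              if PySem.List.pyGetD ('*' :: mid ++ ['*']) i '*' = '*' then (acc.1 ++ [acc.2], ([] : List Char))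
              else (acc.1, acc.2 ++ [PySem.List.pyGetD ('*' :: mid ++ ['*']) i '*']))
            (fun (acc : List (List Char) × List Char) i =>
              if PySem.List.pyGetD ('*' :: mid ++ ['*']).dropLast i '*' = '*' then (acc.1 ++ [acc.2], ([] : List Char))
              else (acc.1, acc.2 ++ [PySem.List.pyGetD ('*' :: mid ++ ['*']).dropLast i '*']))
            ([], [])
            (by
              intro acc i hi
              dsimp only
              rw [PySem.List.mem_pyRange_one] at hi
              have hpg : PySem.List.pyGetD ('*' :: mid ++ ['*']) i '*' =
                  PySem.List.pyGetD ('*' :: mid ++ ['*']).dropLast i '*' := by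
                rw [PySem.List.pyGetD_eq_getElem _ _ (by omega) (by push_cast at hi ⊢; omega),
                    PySem.List.pyGetD_eq_getElem _ _ (by omega)
                      (by simp only [List.length_dropLast]; push_cast at hi ⊢; omega)]
                exact (List.getElem_dropLast _).symm
              rw [hpg])
          rw [hcongr]
          rw [show ((('*' :: mid ++ ['*']).length : Int) - 1)
                = ((('*' :: mid ++ ['*']).dropLast.length : Int)) by
              simp]
          rw [PySem.List.foldl_pyRange_pyGetD' ('*' :: mid ++ ['*']).dropLast '*'
            (fun (acc : List (List Char) × List Char) c =>
              if c = '*' then (acc.1 ++ [acc.2], ([] : List Char)) else (acc.1, acc.2 ++ [c]))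
            ([], []) (by omega)]
          rw [show ('*' :: mid ++ ['*']).dropLast.drop (1 : Int).toNat = mid by
            rw [show ('*' :: mid ++ ['*']) = ('*' :: mid) ++ ['*'] by simp,
                List.dropLast_concat]
            simp]
          rw [foldA, List.nil_append]
          rw [adjAll_eq _ (segsFrom_ne_nil [] mid)]
          rw [segsFrom_headI]
          simp
        -- ===== B side =====
        have hB : LineAnalysisAltL ('*' :: mid ++ ['*']) =
            decide (∀ s ∈ segsFrom [] mid, s = mid.takeWhile (· ≠ '*')) := by
          simp only [LineAnalysisAltL]
          rw [if_neg (by push_neg; exact ⟨by simp, g0, g1⟩)]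
          rw [show PySem.List.slice ('*' :: mid ++ ['*']) (some 1) none = mid ++ ['*'] by
            rw [PySem.List.slice_from_one]; simp]
          rw [if_neg (by simp)]
          rw [index_star]
          dsimp only
          rw [show ((((mid.takeWhile (· ≠ '*')).length : Nat) : Int) + 1)
                = (((mid.takeWhile (· ≠ '*')).length + 1 : Nat) : Int) by push_cast; ring]
          rw [PySem.List.slice_to_natCast]
          rw [take_unit]
          rw [show mid ++ ['*'] = (segsFrom [] mid).flatMap (· ++ ['*']) by
            rw [segsFrom_flatMap]; simp]
          exact rep_eq (segsFrom [] mid) (mid.takeWhile (· ≠ '*')) (starFree_takeWhile mid)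
            (segsFrom_starFree [] mid (by simp))
        rw [hA, hB]
    · -- the bounding-star guard fails: both programs return false
      have hA : LineAnalysisL l = false := by
        simp only [LineAnalysisL]
        rw [if_neg (by omega), if_neg ?_]
        rintro ⟨hx, hy⟩
        rw [e0, e1] at hx
        rw [e1] at hy
        exact hg ⟨by rw [Option.some_inj.mp hx]; exact Option.some_inj.mp hy,
                  Option.some_inj.mp hy⟩
      have hB : LineAnalysisAltL l = false := by
        simp only [LineAnalysisAltL]
        rw [if_pos ?_]
        by_cases h0 : l[0]'hlen = '*'
        · right; right
          rw [e1]
          intro h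
          exact hg ⟨h0, Option.some_inj.mp h⟩
        · right; left
          rw [e0]
          intro h
          exact h0 (Option.some_inj.mp h)
      rw [hA, hB]

-- ===== VERDICT (by name: the statement is the Claim_ definition above) =====
theorem LineAnalysis_spec : Claim_equal_LineAnalysis := by
  intro line _
  unfold Spec_LineAnalysis LineAnalysis LineAnalysis_alt
  exact mainL line.toList
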